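-- pv_equiv track=rewrite | github.com/basimkhajwal/ProgrammingChallenges | Project Euler/problem872.py | solve
-- ===== SOURCE A (Python) =====
-- def solve(n, k):
--     m = n - k
--     a = t = k
--     for b in range(60,-1,-1):
--         x = 1 << b
--         if m & x:
--             a += x
--             t += a
--     return t
-- ===== SOURCE B (Python) =====
-- def _rank_sum(m, w, r):
--     # (final rank counter, sum of bitvalue*rank over set bits of m, low bit weight w, ranks start at r+1)
--     if m == 0:
--         return (r, 0)
--     if m % 2:
--         r2, s = _rank_sum(m // 2, w * 2, r + 1)
--         return (r2, s + w * (r + 1))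
--     return _rank_sum(m // 2, w * 2, r)
--
-- def solve(n, k):
--     m = (n - k) % (1 << 61)
--     r, s = _rank_sum(m, 1, 0)
--     return k * (r + 1) + s
-- ===== Notes on version B (the rewrite author's own statement) =====
-- stated objective: alternative
-- what changed: A scans all 61 bit positions high-to-low keeping a running accumulator a and adding it into t at each set bit; B reduces n-k modulo 2^61 once and recurses over the binary digits low-to-high, computing the popcount r and the rank-weighted sum of set-bit values, returning the closed form k*(r+1) + sum.
import Mathlib
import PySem

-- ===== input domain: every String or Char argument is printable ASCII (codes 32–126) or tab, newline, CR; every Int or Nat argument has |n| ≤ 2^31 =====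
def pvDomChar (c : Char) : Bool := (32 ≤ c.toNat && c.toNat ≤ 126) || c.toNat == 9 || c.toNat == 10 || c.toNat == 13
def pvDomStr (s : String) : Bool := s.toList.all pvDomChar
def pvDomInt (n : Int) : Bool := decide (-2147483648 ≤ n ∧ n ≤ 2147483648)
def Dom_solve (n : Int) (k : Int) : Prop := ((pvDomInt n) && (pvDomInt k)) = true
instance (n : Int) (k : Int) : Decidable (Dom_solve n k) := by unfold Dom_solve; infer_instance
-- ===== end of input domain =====

-- B replaces A's high-to-low 61-bit scan with running accumulator by a low-to-high
-- recursion over the masked value's binary digits computing a rank-weighted closed form;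
-- objective: alternative decomposition, same return value on every input.

-- ===== PORT A =====
-- loop body of A's for-loop (named helper; same state (a, t), same branch order).
-- Python's `m & x` on ints is exactly Int.land (two's complement); `if m & x:` tests ≠ 0.
def stepA (m : Int) (st : Int × Int) (b : Int) : Int × Int :=
  let x : Int := 1 <<< b
  if Int.land m x ≠ 0 then (st.1 + x, st.2 + st.1 + x) else st

def solve (n : Int) (k : Int) : Int :=
  let m := n - k
  ((PySem.List.pyRange 60 (-1) (-1)).foldl (stepA m) (k, k)).2

-- ===== PORT B =====
-- port of Source B's _rank_sum; its argument m is ≥ 0 in Source B (it is fed a `%` with positive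
-- modulus), so it is carried as a Nat; recursion on m // 2 exactly as in Source B
def rankSum (m : Nat) (w : Int) (r : Int) : Int × Int :=
  if m = 0 then (r, 0)
  else if m % 2 = 1 then
    ((rankSum (m / 2) (w * 2) (r + 1)).1, (rankSum (m / 2) (w * 2) (r + 1)).2 + w * (r + 1))
  else rankSum (m / 2) (w * 2) r
termination_by m
decreasing_by all_goals omega

def solve_alt (n : Int) (k : Int) : Int :=
  let m := PySem.Int.mod (n - k) ((1 : Int) <<< (61 : Int))
  let p := rankSum m.toNat 1 0
  k * (p.1 + 1) + p.2

-- ===== PRECONDITION & SPEC =====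
def Spec_solve (n : Int) (k : Int) (out : Int) : Prop := out = solve_alt n k
instance (n : Int) (k : Int) (out : Int) : Decidable (Spec_solve n k out) := by unfold Spec_solve; infer_instance

-- ===== CLAIM (what is proved, stated in full; the proofs are below) =====
def Claim_equal_solve : Prop := ∀ (n : Int) (k : Int), Dom_solve n k → Spec_solve n k (solve n k)

-- ===== LEMMAS AND PROOFS =====

-- the descending list [B-1, …, 1, 0] that range(60,-1,-1) denotes (for B = 61)
def descList (B : Nat) : List Int := (List.range B).reverse.map (fun i => (i : Int))

lemma descList_succ (B : Nat) : descList (B + 1) = (B : Int) :: descList B := by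
  simp [descList, List.range_succ]

set_option maxRecDepth 10000 in
lemma pyRange_desc : PySem.List.pyRange 60 (-1) (-1) = descList 61 := by decide

-- unfolding equations for rankSum
lemma rankSum_zero (w r : Int) : rankSum 0 w r = (r, 0) := by
  rw [rankSum.eq_def]; simp

lemma rankSum_odd (m : Nat) (w r : Int) (h : m % 2 = 1) :
    rankSum m w r =
      ((rankSum (m / 2) (w * 2) (r + 1)).1,
       (rankSum (m / 2) (w * 2) (r + 1)).2 + w * (r + 1)) := by
  rw [rankSum.eq_def]; rw [if_neg (by omega), if_pos h]

lemma rankSum_even (m : Nat) (w r : Int) (h0 : m ≠ 0) (h : m % 2 ≠ 1) :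
    rankSum m w r = rankSum (m / 2) (w * 2) r := by
  rw [rankSum.eq_def]; rw [if_neg h0, if_neg h]

-- adding one bit above all bits of m: it gets rank (rankSum m w r).1 + 1
lemma rankSum_add_pow (B : Nat) : ∀ (m : Nat), m < 2 ^ B → ∀ (w r : Int),
    rankSum (m + 2 ^ B) w r =
      ((rankSum m w r).1 + 1,
       (rankSum m w r).2 + w * ((2 ^ B : Nat) : Int) * ((rankSum m w r).1 + 1)) := by
  induction B with
  | zero =>
      intro m hm w r
      have hm0 : m = 0 := by omega
      subst hm0
      rw [show (0:ℕ) + 2 ^ 0 = 1 by norm_num]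
      rw [rankSum_odd 1 w r (by norm_num)]
      norm_num [rankSum_zero]
  | succ B ih =>
      intro m hm w r
      have hp : (2:ℕ) ^ (B + 1) = 2 ^ B * 2 := by ring
      have hpn : 0 < (2:ℕ) ^ B := by positivity
      have hdiv : (m + 2 ^ (B + 1)) / 2 = m / 2 + 2 ^ B := by omega
      have hlt : m / 2 < 2 ^ B := by omega
      by_cases h1 : m % 2 = 1
      · rw [rankSum_odd (m + 2 ^ (B + 1)) w r (by omega), hdiv,
            rankSum_odd m w r h1, ih (m / 2) hlt (w * 2) (r + 1)]
        simp only [Prod.mk.injEq]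
        refine ⟨trivial, ?_⟩
        push_cast [hp]
        ring
      · by_cases hz : m = 0
        · subst hz
          rw [rankSum_even (0 + 2 ^ (B + 1)) w r (by positivity) (by omega), hdiv]
          rw [show (0:ℕ) / 2 + 2 ^ B = 0 + 2 ^ B by omega]
          rw [ih 0 (by positivity) (w * 2) r, rankSum_zero, rankSum_zero]
          simp only [Prod.mk.injEq]
          refine ⟨trivial, ?_⟩
          push_cast [hp]
          ring
        · rw [rankSum_even (m + 2 ^ (B + 1)) w r (by omega) (by omega), hdiv,
              rankSum_even m w r hz (by omega), ih (m / 2) hlt (w * 2) r]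
          simp only [Prod.mk.injEq]
          refine ⟨trivial, ?_⟩
          push_cast [hp]
          ring

-- m % 2^(B+1) splits into m % 2^B plus the B-th bit
lemma emod_pow_succ (m : Int) (B : Nat) :
    m % 2 ^ (B + 1) = m % 2 ^ B + 2 ^ B * ((m / 2 ^ B) % 2) := by
  have hx : (0:Int) < 2 ^ B := by positivity
  have h1 : 2 ^ B * (m / 2 ^ B) + m % 2 ^ B = m := Int.mul_ediv_add_emod m (2 ^ B)
  have h2 : 2 * (m / 2 ^ B / 2) + (m / 2 ^ B) % 2 = m / 2 ^ B := Int.mul_ediv_add_emod (m / 2 ^ B) 2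
  have hr0 : 0 ≤ m % 2 ^ B := Int.emod_nonneg _ (ne_of_gt hx)
  have hr1 : m % 2 ^ B < 2 ^ B := Int.emod_lt_of_pos _ hx
  have hb0 : 0 ≤ (m / 2 ^ B) % 2 := Int.emod_nonneg _ (by norm_num)
  have hb1 : (m / 2 ^ B) % 2 < 2 := Int.emod_lt_of_pos _ (by norm_num)
  have hrw : m = (m % 2 ^ B + 2 ^ B * ((m / 2 ^ B) % 2)) + 2 ^ (B + 1) * (m / 2 ^ B / 2) := by
    rw [pow_succ]
    nlinarith [h1, h2]
  calc m % 2 ^ (B + 1)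
      = ((m % 2 ^ B + 2 ^ B * ((m / 2 ^ B) % 2)) + 2 ^ (B + 1) * (m / 2 ^ B / 2)) % 2 ^ (B + 1) := by
        rw [← hrw]
    _ = (m % 2 ^ B + 2 ^ B * ((m / 2 ^ B) % 2)) % 2 ^ (B + 1) := by
        rw [Int.add_mul_emod_self_left]
    _ = m % 2 ^ B + 2 ^ B * ((m / 2 ^ B) % 2) := by
        refine Int.emod_eq_of_lt (by nlinarith) ?_
        rw [pow_succ]
        nlinarith

-- the Python truth test `m & (1 << b)` read as the b-th bit of m
lemma land_pow_ne_zero (m : Int) (B : Nat) :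
    (Int.land m ((1:Int) <<< ((B : Nat) : Int)) ≠ 0) ↔ (m / 2 ^ B) % 2 = 1 := by
  rw [Int.one_shiftLeft]
  rw [show ((2:ℤ) ^ B) = ((2 ^ B : ℕ) : ℤ) by push_cast; ring]
  cases m with
  | ofNat a =>
      have hland : Int.land (Int.ofNat a) ((2 ^ B : ℕ) : ℤ) = ((a &&& 2 ^ B : ℕ) : ℤ) := rfl
      have hdm : Int.ofNat a / ((2 ^ B : ℕ) : ℤ) = ((a / 2 ^ B : ℕ) : ℤ) := by
        rw [Int.ofNat_eq_natCast, ← Int.natCast_ediv]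
      rw [hland, Nat.and_two_pow, hdm]
      have htb : a.testBit B = decide (a / 2 ^ B % 2 = 1) := Nat.testBit_eq_decide_div_mod_eq
      by_cases hab : a.testBit B
      · have hc : a / 2 ^ B % 2 = 1 := by rw [hab] at htb; exact of_decide_eq_true htb.symm
        simp only [hab, Bool.toNat_true, one_mul]
        constructor
        · intro _; omega
        · intro _
          have h2 : (2 ^ B : ℕ) ≠ 0 := by positivity
          exact_mod_cast h2
      · have hc : a / 2 ^ B % 2 ≠ 1 := by
          intro hcc
          rw [hcc] at htb; simp at htb; exact hab htb
        simp only [hab, Bool.toNat_false, zero_mul, Nat.cast_zero, ne_eq, not_true_eq_false,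
          false_iff]
        omega
  | negSucc a =>
      have hland : Int.land (Int.negSucc a) ((2 ^ B : ℕ) : ℤ) = ((Nat.ldiff (2 ^ B) a : ℕ) : ℤ) := rfl
      have hld : Nat.ldiff (2 ^ B) a = if a.testBit B then 0 else 2 ^ B := by
        apply Nat.eq_of_testBit_eq
        intro i
        rcases eq_or_ne B i with h | h
        · subst h
          by_cases hab : a.testBit B <;> simp [Nat.testBit_ldiff, hab]
        · by_cases hab : a.testBit B <;> simp [Nat.testBit_ldiff, h, hab]
      have hx : (0:ℤ) < ((2 ^ B : ℕ) : ℤ) := by exact_mod_cast (by positivity : 0 < (2 ^ B : ℕ))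
      have hdm := Int.mul_ediv_add_emod (a:ℤ) ((2 ^ B : ℕ) : ℤ)
      have hr0 : 0 ≤ (a:ℤ) % ((2 ^ B : ℕ) : ℤ) := Int.emod_nonneg _ (ne_of_gt hx)
      have hr1 : (a:ℤ) % ((2 ^ B : ℕ) : ℤ) < ((2 ^ B : ℕ) : ℤ) := Int.emod_lt_of_pos _ hx
      have key : Int.negSucc a =
          (((2 ^ B : ℕ) : ℤ) - 1 - (a:ℤ) % ((2 ^ B : ℕ) : ℤ))
            + ((2 ^ B : ℕ) : ℤ) * (-((a:ℤ) / ((2 ^ B : ℕ) : ℤ)) - 1) := by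
        rw [Int.negSucc_eq]
        nlinarith [hdm]
      have hq : Int.negSucc a / ((2 ^ B : ℕ) : ℤ) = -((a:ℤ) / ((2 ^ B : ℕ) : ℤ)) - 1 := by
        rw [key, Int.add_mul_ediv_left _ _ (ne_of_gt hx),
            Int.ediv_eq_zero_of_lt (by linarith) (by linarith)]
        ring
      have hcd : (a:ℤ) / ((2 ^ B : ℕ) : ℤ) = ((a / 2 ^ B : ℕ) : ℤ) := by
        rw [← Int.natCast_ediv]
      have htb : a.testBit B = decide (a / 2 ^ B % 2 = 1) := Nat.testBit_eq_decide_div_mod_eq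
      rw [hland, hld, hq, hcd]
      by_cases hab : a.testBit B
      · have hc : a / 2 ^ B % 2 = 1 := by rw [hab] at htb; exact of_decide_eq_true htb.symm
        simp only [hab, if_true, Nat.cast_zero, ne_eq, not_true_eq_false, false_iff]
        omega
      · have hc : a / 2 ^ B % 2 ≠ 1 := by
          intro hcc
          rw [hcc] at htb; simp at htb; exact hab htb
        simp only [hab, ne_eq]
        constructor
        · intro _
          omega
        · intro _
          exact fun h0 => absurd h0 (ne_of_gt hx)

-- A's fold over bits B-1 … 0 computed in closed form from rankSum of m % 2^B
lemma foldA (m : Int) (B : Nat) : ∀ (a t : Int),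
    (descList B).foldl (stepA m) (a, t) =
      (a + m % 2 ^ B,
       t + (rankSum (m % 2 ^ B).toNat 1 0).1 * a + (rankSum (m % 2 ^ B).toNat 1 0).2) := by
  induction B with
  | zero =>
      intro a t
      simp [descList, rankSum_zero]
  | succ B ih =>
      intro a t
      rw [descList_succ, List.foldl_cons]
      have hsplit := emod_pow_succ m B
      have h0 : 0 ≤ m % 2 ^ B := Int.emod_nonneg _ (by positivity)
      have h1 : m % 2 ^ B < 2 ^ B := Int.emod_lt_of_pos _ (by positivity)
      have hc : ((2 ^ B : ℕ) : ℤ) = (2 : ℤ) ^ B := by push_cast; ring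
      by_cases hset : (m / 2 ^ B) % 2 = 1
      · have hstep : stepA m (a, t) ((B : ℕ) : ℤ) = (a + 2 ^ B, t + a + 2 ^ B) := by
          simp only [stepA]
          rw [if_pos ((land_pow_ne_zero m B).mpr hset), Int.one_shiftLeft, hc]
        rw [hstep, ih]
        have hm1 : m % 2 ^ (B + 1) = m % 2 ^ B + 2 ^ B := by rw [hsplit, hset]; ring
        have htn : (m % 2 ^ (B + 1)).toNat = (m % 2 ^ B).toNat + 2 ^ B := by
          have hcc := hc
          omega
        have hlt : (m % 2 ^ B).toNat < 2 ^ B := by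
          have hcc := hc
          omega
        rw [htn, rankSum_add_pow B _ hlt 1 0, hm1]
        simp only [Prod.mk.injEq, hc]
        constructor
        · ring
        · ring
      · have hset0 : (m / 2 ^ B) % 2 = 0 := by omega
        have hstep : stepA m (a, t) ((B : ℕ) : ℤ) = (a, t) := by
          simp only [stepA]
          rw [if_neg (fun h => absurd ((land_pow_ne_zero m B).mp h) (by omega))]
        have hm1 : m % 2 ^ (B + 1) = m % 2 ^ B := by rw [hsplit, hset0]; ring
        rw [hstep, ih, hm1]

lemma solve_eq_alt (n k : Int) : solve n k = solve_alt n k := by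
  have h61 : ((1:Int) <<< (61:Int)) = 2 ^ 61 := by decide
  have hpos : (0:ℤ) < 2 ^ 61 := by positivity
  simp only [solve, solve_alt, pyRange_desc]
  rw [h61, PySem.Int.mod_eq_emod_of_pos hpos]
  rw [foldA (n - k) 61 k k]
  show k + (rankSum ((n - k) % 2 ^ 61).toNat 1 0).1 * k + (rankSum ((n - k) % 2 ^ 61).toNat 1 0).2
      = k * ((rankSum ((n - k) % 2 ^ 61).toNat 1 0).1 + 1) + (rankSum ((n - k) % 2 ^ 61).toNat 1 0).2
  ring

-- ===== VERDICT (by name: the statement is the Claim_ definition above) =====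
theorem solve_spec : Claim_equal_solve := by
  intro n k _
  unfold Spec_solve
  exact solve_eq_alt n k
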